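-- pv_equiv track=rewrite | github.com/alvanxp/algorithms | Codility/equityleaders.py | goldenLeader
-- ===== SOURCE A (Python) =====
-- def goldenLeader(A):
--     n = len(A)
--     size = 0
--     for k in range(n):
--         if (size == 0):
--             size += 1
--             value = A[k]
--         else:
--             if (value != A[k]):
--                 size -= 1
--             else:
--                 size += 1
--     candidate = -1
--     if (size > 0):
--         candidate = value
--     count = 0
--     result = 0
--     for k in range(n):
--         if (A[k] == candidate):
--             count += 1
--     left = 0
--     right = 0
--     for k in range(n):
--         if (A[k] == candidate):
--             left += 1
--         right = count - left
--         l = left > (k+1) // 2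
--         r = right > (n - (k+1))//2
--         if l and r :
--             result +=1
--
--     return result
-- ===== SOURCE B (Python) =====
-- def goldenLeader(A):
--     n = len(A)
--     counts = {}
--     for x in A:
--         counts[x] = counts.get(x, 0) + 1
--     candidate, count = -1, 0
--     for x, c in counts.items():
--         if c > count:
--             candidate, count = x, c
--     if 2 * count <= n:
--         return 0
--     left = 0
--     result = 0
--     for k, x in enumerate(A):
--         if x == candidate:
--             left += 1
--         right = count - left
--         if left > (k + 1) // 2 and right > (n - k - 1) // 2:
--             result += 1
--     return result
-- ===== Notes on version B (the rewrite author's own statement) =====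
-- stated objective: alternative
-- what changed: Replaces the Boyer-Moore voting pass plus a separate counting pass by a single frequency dictionary with a first-max scan, and returns 0 immediately when no strict majority exists (so the prefix split-point scan only runs when it can count something); the prefix scan itself is kept.
import Mathlib
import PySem

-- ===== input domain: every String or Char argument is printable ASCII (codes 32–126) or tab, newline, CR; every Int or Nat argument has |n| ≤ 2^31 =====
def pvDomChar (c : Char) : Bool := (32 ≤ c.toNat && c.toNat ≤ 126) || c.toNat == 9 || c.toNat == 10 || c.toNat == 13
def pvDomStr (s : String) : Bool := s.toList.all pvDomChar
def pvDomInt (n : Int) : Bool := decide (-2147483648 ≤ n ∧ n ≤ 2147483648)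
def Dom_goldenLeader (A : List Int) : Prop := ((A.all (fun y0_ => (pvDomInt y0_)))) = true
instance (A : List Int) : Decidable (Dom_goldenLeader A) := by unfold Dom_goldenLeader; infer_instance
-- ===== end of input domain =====

-- B replaces A's Boyer–Moore voting pass (plus separate counting pass) by one frequency
-- dictionary with a first-max scan, and returns 0 at once when no strict majority exists;
-- the prefix split-point scan is kept. Equal return value on every input (proved below).

-- ===== PORT A =====
def goldenLeader (A : List Int) : Int :=
  let n : Int := A.length
  let sv : Int × Int := A.foldl (fun p a =>
      if p.1 = 0 then (p.1 + 1, a)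
      else if p.2 ≠ a then (p.1 - 1, p.2) else (p.1 + 1, p.2)) (0, 0)
  let candidate : Int := if sv.1 > 0 then sv.2 else -1
  let count : Int := A.foldl (fun c a => if a = candidate then c + 1 else c) 0
  let lr : Int × Int := (PySem.List.enumerate A 0).foldl (fun p ka =>
      let left := if ka.2 = candidate then p.1 + 1 else p.1
      let right := count - left
      let l := left > PySem.Int.floordiv (ka.1 + 1) 2
      let r := right > PySem.Int.floordiv (n - (ka.1 + 1)) 2
      (left, if l ∧ r then p.2 + 1 else p.2)) (0, 0)
  lr.2

-- ===== PORT B =====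
def goldenLeader_alt (A : List Int) : Int :=
  let n : Int := A.length
  let counts := A.foldl (fun (d : PySem.Dict Int Int) x => d.insert x (d.getD x 0 + 1))
      PySem.Dict.empty
  let cm : Int × Int := counts.items.foldl (fun p xc => if xc.2 > p.2 then xc else p) (-1, 0)
  if 2 * cm.2 ≤ n then 0
  else
    let lr : Int × Int := (PySem.List.enumerate A 0).foldl (fun p ka =>
        let left := if ka.2 = cm.1 then p.1 + 1 else p.1
        let right := cm.2 - left
        (left, if left > PySem.Int.floordiv (ka.1 + 1) 2 ∧
                  right > PySem.Int.floordiv (n - (ka.1 + 1)) 2 then p.2 + 1 else p.2)) (0, 0)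
    lr.2

-- ===== PRECONDITION & SPEC =====
def Spec_goldenLeader (A : List Int) (out : Int) : Prop := out = goldenLeader_alt A
instance (A : List Int) (out : Int) : Decidable (Spec_goldenLeader A out) := by unfold Spec_goldenLeader; infer_instance

-- ===== CLAIM (what is proved, stated in full; the proofs are below) =====
def Claim_equal_goldenLeader : Prop := ∀ (A : List Int), Dom_goldenLeader A → Spec_goldenLeader A (goldenLeader A)

-- ===== LEMMAS AND PROOFS =====

-- A's Boyer–Moore voting step.
def pvBM (p : Int × Int) (a : Int) : Int × Int :=
  if p.1 = 0 then (p.1 + 1, a)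
  else if p.2 ≠ a then (p.1 - 1, p.2) else (p.1 + 1, p.2)

-- The shared third phase (prefix scan), abstracted over candidate/count for the lemmas.
def pvScan (n count candidate : Int) (A : List Int) (s : Int) (init : Int × Int) : Int × Int :=
  (PySem.List.enumerate A s).foldl (fun p ka =>
      let left := if ka.2 = candidate then p.1 + 1 else p.1
      let right := count - left
      let l := left > PySem.Int.floordiv (ka.1 + 1) 2
      let r := right > PySem.Int.floordiv (n - (ka.1 + 1)) 2
      (left, if l ∧ r then p.2 + 1 else p.2)) init

-- Boyer–Moore invariant: the advantage bound 2·count x ≤ len + (s if x is the candidate else −s).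
lemma pv_ite_zero (x v : Int) : (if x = v then (0:Int) else -0) = 0 := by split <;> ring

lemma pvBM_inv (l : List Int) : ∀ (s v : Int), 0 ≤ s →
    0 ≤ (l.foldl pvBM (s, v)).1 ∧
    ∀ x : Int, 2 * (l.count x : Int) + (if x = v then s else -s) ≤
      (l.length : Int) + (if x = (l.foldl pvBM (s, v)).2 then (l.foldl pvBM (s, v)).1
        else -(l.foldl pvBM (s, v)).1) := by
  induction l with
  | nil => intro s v hs; exact ⟨hs, fun x => by simp⟩
  | cons a t ih =>
    intro s v hs
    simp only [List.foldl_cons, List.length_cons]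
    by_cases h0 : s = 0
    · subst h0
      have hstep : pvBM (0, v) a = (1, a) := by simp [pvBM]
      rw [hstep]
      obtain ⟨h1, h2⟩ := ih 1 a (by omega)
      refine ⟨h1, fun x => ?_⟩
      have h2x := h2 x
      rw [List.count_cons, pv_ite_zero]
      by_cases hax : a = x
      · rw [if_pos (beq_iff_eq.mpr hax)]
        rw [if_pos hax.symm] at h2x
        push_cast
        linarith
      · rw [if_neg (by simp [hax])]
        rw [if_neg (fun h => hax h.symm)] at h2x
        push_cast
        linarith
    · by_cases hva : v = a
      · have hstep : pvBM (s, v) a = (s + 1, v) := by simp [pvBM, h0, hva]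
        rw [hstep]
        obtain ⟨h1, h2⟩ := ih (s + 1) v (by omega)
        refine ⟨h1, fun x => ?_⟩
        have h2x := h2 x
        rw [List.count_cons]
        by_cases hxv : x = v
        · rw [if_pos hxv] at h2x
          rw [if_pos (beq_iff_eq.mpr (hxv.trans hva).symm), if_pos hxv]
          push_cast
          linarith
        · rw [if_neg hxv] at h2x
          have hax : ¬ a = x := fun h => hxv (by rw [← h, hva])
          rw [if_neg (by simp [hax]), if_neg hxv]
          push_cast
          linarith
      · have hstep : pvBM (s, v) a = (s - 1, v) := by simp [pvBM, h0, hva]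
        rw [hstep]
        obtain ⟨h1, h2⟩ := ih (s - 1) v (by omega)
        refine ⟨h1, fun x => ?_⟩
        have h2x := h2 x
        rw [List.count_cons]
        by_cases hxv : x = v
        · rw [if_pos hxv] at h2x
          have hax : ¬ a = x := fun h => hva ((h.trans hxv).symm)
          rw [if_neg (by simp [hax]), if_pos hxv]
          push_cast
          linarith
        · rw [if_neg hxv] at h2x
          rw [if_neg hxv]
          by_cases hax : a = x
          · rw [if_pos (beq_iff_eq.mpr hax)]
            push_cast
            linarith
          · rw [if_neg (by simp [hax])]
            push_cast
            linarith

-- If x is a strict majority element, the voting pass ends with positive size and value x.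
lemma pvBM_majority (A : List Int) (x : Int) (hx : 2 * (A.count x : Int) > A.length) :
    (A.foldl pvBM (0, 0)).1 > 0 ∧ (A.foldl pvBM (0, 0)).2 = x := by
  obtain ⟨hpos, hinv⟩ := pvBM_inv A 0 0 le_rfl
  have h := hinv x
  rw [pv_ite_zero] at h
  by_cases hxe : x = (A.foldl pvBM (0, 0)).2
  · rw [if_pos hxe] at h
    exact ⟨by omega, hxe.symm⟩
  · rw [if_neg hxe] at h
    exfalso
    omega

-- The counting pass computes List.count.
lemma pv_count_pass (A : List Int) (c : Int) :
    A.foldl (fun acc a => if a = c then acc + 1 else acc) 0 = (A.count c : Int) := by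
  have := PySem.List.foldl_count_if (fun a => a == c) A 0
  simpa [List.count] using this

-- If the candidate has no strict majority, the prefix scan never increments the result.
lemma pvScan_zero (n count candidate : Int) (hcn : 2 * count ≤ n) :
    ∀ (l : List Int) (s left res : Int), 0 ≤ s → left + (l.count candidate : Int) ≤ count →
      s + (l.length : Int) = n → (pvScan n count candidate l s (left, res)).2 = res := by
  intro l
  induction l with
  | nil => intro s left res _ _ _; simp [pvScan, PySem.List.enumerate_nil]
  | cons a t ih =>
    intro s left res hs hleft hlen
    rw [pvScan, PySem.List.enumerate_cons, List.foldl_cons]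
    simp only
    set left' : Int := if a = candidate then left + 1 else left with hleft'
    have hcnt : (List.count candidate (a :: t) : Int)
        = (t.count candidate : Int) + (if a = candidate then 1 else 0) := by
      rw [List.count_cons]; split <;> simp_all
    have hleft'le : left' + (t.count candidate : Int) ≤ count := by
      rw [hleft']; split <;> rw [hcnt] at hleft <;> simp_all
      omega
    have hlen' : (s + 1) + (t.length : Int) = n := by
      simp only [List.length_cons] at hlen; push_cast at hlen ⊢; omega
    have hcond : ¬ (left' > PySem.Int.floordiv (s + 1) 2 ∧
        count - left' > PySem.Int.floordiv (n - (s + 1)) 2) := by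
      rw [PySem.Int.floordiv_eq_ediv_of_pos (by norm_num),
          PySem.Int.floordiv_eq_ediv_of_pos (by norm_num)]
      have htc : (0 : Int) ≤ (t.count candidate : Int) := by positivity
      omega
    rw [if_neg hcond]
    exact ih (s + 1) left' res (by omega) hleft'le hlen'

-- The first-max fold either returns its initial pair or a member of the list.
lemma pv_argmax_mem (l : List (Int × Int)) : ∀ init : Int × Int,
    l.foldl (fun p xc => if xc.2 > p.2 then xc else p) init = init ∨
    l.foldl (fun p xc => if xc.2 > p.2 then xc else p) init ∈ l := by
  induction l with
  | nil => intro init; left; rfl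
  | cons a t ih =>
    intro init
    rw [List.foldl_cons]
    rcases ih (if a.2 > init.2 then a else init) with h | h
    · rw [h]; split <;> simp_all
    · right; exact List.mem_cons_of_mem _ h

-- With a unique strict maximum, the first-max fold returns exactly it.
lemma pv_argmax_unique (x m : Int) : ∀ (l : List (Int × Int)) (init : Int × Int),
    (x, m) ∈ l → (∀ p ∈ l, p.1 ≠ x → p.2 < m) → (∀ p ∈ l, p.1 = x → p.2 = m) →
    init.2 < m → l.foldl (fun p xc => if xc.2 > p.2 then xc else p) init = (x, m) := by
  intro l
  induction l with
  | nil => intro init h; simp at h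
  | cons a t ih =>
    intro init hmem hlt hx hinit
    rw [List.foldl_cons]
    by_cases ha : a.1 = x
    · have ham : a.2 = m := hx a (List.mem_cons_self) ha
      have haxm : a = (x, m) := by rw [← ha, ← ham]
      rw [haxm, if_pos (by simpa using hinit)]
      -- stays: every later element has second component ≤ m
      clear hmem ih
      induction t with
      | nil => rfl
      | cons b u ihu =>
        rw [List.foldl_cons]
        have hb : b.2 ≤ m := by
          by_cases hbx : b.1 = x
          · exact le_of_eq (hx b (by simp) hbx)
          · exact le_of_lt (hlt b (by simp) hbx)
        rw [if_neg (by simpa using not_lt.mpr hb)]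
        exact ihu
          (fun p hp => hlt p (by rcases List.mem_cons.mp hp with h | h <;> simp [h]))
          (fun p hp => hx p (by rcases List.mem_cons.mp hp with h | h <;> simp [h]))
    · have hmem' : (x, m) ∈ t := by
        rcases List.mem_cons.mp hmem with h | h
        · exact absurd (congrArg Prod.fst h.symm) ha
        · exact h
      have hacc : (if a.2 > init.2 then a else init).2 < m := by
        split
        · exact hlt a List.mem_cons_self ha
        · exact hinit
      exact ih _ hmem' (fun p hp => hlt p (List.mem_cons_of_mem _ hp))
        (fun p hp => hx p (List.mem_cons_of_mem _ hp)) hacc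

-- Two occurrences of distinct values: their counts add up to at most the length.
lemma pv_count_two (A : List Int) (x k : Int) (hne : k ≠ x) :
    A.count k + A.count x ≤ A.length := by
  have h1 : A.count k ≤ A.countP (fun a => ¬ (a == x)) := by
    apply List.countP_mono_left
    intro a _ hak
    simp only [beq_iff_eq] at *
    simp [hak, hne]
  have h2 := List.length_eq_countP_add_countP (fun a => a == x) (l := A)
  simp only [List.count] at *
  omega

-- ===== VERDICT (by name: the statement is the Claim_ definition above) =====
theorem goldenLeader_spec : Claim_equal_goldenLeader := by
  intro A _
  unfold Spec_goldenLeader goldenLeader goldenLeader_alt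
  simp only [PySem.Dict.foldl_insert_getD_add_one_eq_counter, PySem.Dict.items_counter]
  by_cases hmaj : ∃ x, 2 * (A.count x : Int) > (A.length : Int)
  · obtain ⟨x, hx⟩ := hmaj
    -- A's candidate is x
    obtain ⟨hpos, hval⟩ := pvBM_majority A x hx
    -- B's argmax is (x, count x)
    have hxA : x ∈ A := by
      by_contra hnx
      rw [List.count_eq_zero_of_not_mem hnx] at hx
      have : (0:Int) ≤ (A.length : Int) := by positivity
      push_cast at hx; omega
    have hargmax : (List.map (fun k => (k, (List.count k A : Int))) (PySem.Set.ofList A)).foldl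
        (fun p xc => if xc.2 > p.2 then xc else p) (-1, 0) = (x, (A.count x : Int)) := by
      apply pv_argmax_unique
      · exact List.mem_map.mpr ⟨x, (PySem.Set.mem_ofList A x).mpr hxA, rfl⟩
      · intro p hp hpx
        obtain ⟨k, hk, rfl⟩ := List.mem_map.mp hp
        simp only at hpx ⊢
        have := pv_count_two A x k hpx
        omega
      · intro p hp hpx
        obtain ⟨k, hk, rfl⟩ := List.mem_map.mp hp
        simp only at hpx ⊢; rw [hpx]
      · omega
    rw [hargmax]
    simp only
    rw [if_neg (show ¬ (2 * ((A.count x : Int)) ≤ (A.length : Int)) by omega)]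
    -- both sides now run the identical scan with candidate x and count (A.count x)
    have hcand : (if (A.foldl pvBM (0, 0)).1 > 0 then (A.foldl pvBM (0, 0)).2 else -1) = x := by
      rw [if_pos hpos, hval]
    show (_ : Int × Int).2 = (_ : Int × Int).2
    rw [show (A.foldl (fun p a => if p.1 = 0 then (p.1 + 1, a)
          else if p.2 ≠ a then (p.1 - 1, p.2) else (p.1 + 1, p.2)) ((0:Int), (0:Int)))
        = A.foldl pvBM (0, 0) from rfl, hcand, pv_count_pass A x]
  · push Not at hmaj
    -- A side: its candidate (whatever it is) has no majority, so the scan yields 0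
    have hlen : (0:Int) ≤ (A.length : Int) := by positivity
    have hAzero : ∀ c : Int, (pvScan (A.length : Int) (A.count c : Int) c A 0 (0, 0)).2 = 0 := by
      intro c
      exact pvScan_zero _ _ _ (by have := hmaj c; omega) A 0 0 0 le_rfl (by omega) (by omega)
    -- B side: the argmax count is 0 or some element's count, both ≤ n/2, so B returns 0
    have hcond : 2 * ((List.map (fun k => (k, (List.count k A : Int))) (PySem.Set.ofList A)).foldl
        (fun p xc => if xc.2 > p.2 then xc else p) (-1, 0)).2 ≤ (A.length : Int) := by
      rcases pv_argmax_mem (List.map (fun k => (k, (List.count k A : Int))) (PySem.Set.ofList A))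
          (-1, 0) with h | h
      · rw [h]; omega
      · obtain ⟨k, hk, heq⟩ := List.mem_map.mp h
        rw [← heq]; simpa using hmaj k
    rw [if_pos hcond]
    set cand : Int := if (A.foldl pvBM (0, 0)).1 > 0 then (A.foldl pvBM (0, 0)).2 else -1 with hcd
    rw [show (A.foldl (fun p a => if p.1 = 0 then (p.1 + 1, a)
          else if p.2 ≠ a then (p.1 - 1, p.2) else (p.1 + 1, p.2)) ((0:Int), (0:Int)))
        = A.foldl pvBM (0, 0) from rfl]
    rw [pv_count_pass A cand]
    exact hAzero cand
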